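-- pv_equiv track=rewrite | github.com/YJHeo01/BOJ | 숫자 할당 - 32825번.py | set_c_g
-- ===== SOURCE A (Python) =====
-- def set_c_g(array,visited,value):
--     ret_value = 0
--     sum_c_g = array[2] - value['k']
--     for c in range(1,sum_c_g):
--         g = sum_c_g - c
--         if c > 13 or g > 13 or visited[c] or visited[g] or c == g: continue
--         visited[c], visited[g] = True, True
--         value['c'], value['g'] = c,g
--         ret_value += set_i_j(array,visited,value)
--         visited[c], visited[g] = False, False
--     return ret_value
--
-- def set_i_j(array,visited,value):
--     ret_value = 0
--     sum_i_j = array[6] - value['k']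
--     for i in range(1,sum_i_j):
--         j = sum_i_j - i
--         if i > 13 or j > 13 or visited[i] or visited[j] or i == j: continue
--         visited[i], visited[j] = True, True
--         value['i'], value['j'] = i,j
--         ret_value += set_d_h(array,visited,value)
--         visited[i], visited[j] = False, False
--     return ret_value
--
-- def set_d_h(array,visited,value):
--     D = array[3]
--     ret_value = 0
--     for d in range(1,D):
--         h = D - d
--         if d > 13 or h > 13 or visited[d] or visited[h] or d == h: continue
--         visited[d], visited[h] = True, True
--         value['d'] = d; value['h'] = h
--         ret_value += set_l_m(array,visited,value)
--         visited[d], visited[h] = False, False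
--     return ret_value
--
-- def set_l_m(array,visited,value):
--     H = array[7]
--     ret_value = 0
--     for l in range(1,H):
--         m = H - l
--         if m > 13 or l > 13 or visited[m] or visited[l] or m == l: continue
--         visited[m], visited[l] = True, True
--         value['m'], value['l'] = m,l
--         ret_value += set_b_f(array,visited,value)
--         visited[m], visited[l] = False, False
--     return ret_value
--
-- def set_b_f(array,visited,value):
--     ret_value = 0
--     b_f_sum = array[1] - value['j'] - value['m']
--     for b in range(1,b_f_sum):
--         f = b_f_sum - b
--         if b > 13 or f > 13 or visited[b] or visited[f] or b == f: continue
--         visited[b], visited[f] = True, True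
--         value['b'], value['f'] = b,f
--         ret_value += set_a_e(array,visited,value)
--         visited[b], visited[f] = False, False
--     return ret_value
--
-- def set_a_e(array,visited,value):
--     ret_value = 0
--     a_e_sum = array[0] - value['i'] - value['l']
--     for a in range(1,a_e_sum):
--         e = a_e_sum - a
--         if a > 13 or e > 13 or visited[a] or visited[e] or a == e: continue
--         if a + value['b'] + value['c'] + value['d'] == array[4] and array[5] == e + value['f'] + value['g'] + value['h']:
--             return 1
--     return 0
-- ===== SOURCE B (Python) =====
-- def set_c_g(array, visited, value):
--     k = value['k']
--
--     def pairs(total, used):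
--         return [(x, total - x) for x in range(1, total)
--                 if x <= 13 and total - x <= 13 and x != total - x
--                 and not visited[x] and x not in used
--                 and not visited[total - x] and (total - x) not in used]
--
--     count = 0
--     for c, g in pairs(array[2] - k, ()):
--         for i, j in pairs(array[6] - k, (c, g)):
--             for d, h in pairs(array[3], (c, g, i, j)):
--                 for l, m in pairs(array[7], (c, g, i, j, d, h)):
--                     for b, f in pairs(array[1] - j - m, (c, g, i, j, d, h, l, m)):
--                         used = (c, g, i, j, d, h, l, m, b, f)
--                         s = array[0] - i - l
--                         a = array[4] - b - c - d
--                         e = s - a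
--                         if (1 <= a < s and a <= 13 and e <= 13 and a != e
--                                 and not visited[a] and a not in used
--                                 and not visited[e] and e not in used
--                                 and e + f + g + h == array[5]):
--                             count += 1
--     return count
-- ===== Notes on version B (the rewrite author's own statement) =====
-- stated objective: simpler
-- what changed: Replaces A's five mutually-calling helpers that mutate visited/value in place by one reusable pair-enumeration helper over immutable used-tuples, and solves the innermost loop in closed form (the sum equation pins a, so the linear scan of set_a_e becomes a single membership/guard test).
-- outside the precondition, e.g. on set_c_g([0, 0, 5, 0, 0, 0, 0, 0], [True, True, True, True, True], {'k': 0}): A returns 0, B returns 0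
import Mathlib
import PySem

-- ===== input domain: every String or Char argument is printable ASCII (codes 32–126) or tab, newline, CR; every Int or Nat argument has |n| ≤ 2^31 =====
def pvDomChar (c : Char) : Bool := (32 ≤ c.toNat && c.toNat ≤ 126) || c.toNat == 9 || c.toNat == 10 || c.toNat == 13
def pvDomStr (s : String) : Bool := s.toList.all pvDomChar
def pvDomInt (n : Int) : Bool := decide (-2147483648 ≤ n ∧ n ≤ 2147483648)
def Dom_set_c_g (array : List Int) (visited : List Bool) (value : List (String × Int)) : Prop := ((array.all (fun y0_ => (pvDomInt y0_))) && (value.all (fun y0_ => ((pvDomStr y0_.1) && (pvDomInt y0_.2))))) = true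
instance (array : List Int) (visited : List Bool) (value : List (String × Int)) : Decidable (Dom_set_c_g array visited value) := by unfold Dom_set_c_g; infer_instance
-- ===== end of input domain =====

-- B replaces A's five mutating helper functions by one pair-enumeration helper reused at every
-- level plus a closed-form solve of the innermost loop variable (objective: simpler).
-- A mutates `visited` (restored on exit) and adds keys to `value` in place; the equivalence
-- proved here is about the RETURN value only (B mutates nothing).

-- ===== PORT A =====
-- visited[i] read / write and array[i]: exact under Pre_ (every executed access has
-- 1 ≤ i ≤ 13 < visited.length, resp. 0 ≤ i < 8 ≤ array.length; the dict key "k" is present).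
def pvGetV (v : List Bool) (i : Int) : Bool := PySem.List.pyGetD v i false
def pvSetV (v : List Bool) (i : Int) : List Bool := PySem.List.pySetD v i true
def pvArr (array : List Int) (i : Int) : Int := PySem.List.pyGetD array i 0

-- the `for a in range(1, a_e_sum)` loop of set_a_e, with its early `return 1`
def pvA_ae_loop (array : List Int) (visited : List Bool) (value : PySem.Dict String Int)
    (s : Int) : List Int → Int
  | [] => 0
  | a :: rest =>
    if a > 13 || (s - a) > 13 || pvGetV visited a || pvGetV visited (s - a) || a == (s - a) then
      pvA_ae_loop array visited value s rest
    else if (a + value.getD "b" 0 + value.getD "c" 0 + value.getD "d" 0 == pvArr array 4)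
            && (pvArr array 5 == (s - a) + value.getD "f" 0 + value.getD "g" 0 + value.getD "h" 0) then
      1
    else
      pvA_ae_loop array visited value s rest

def pvA_set_a_e (array : List Int) (visited : List Bool) (value : PySem.Dict String Int) : Int :=
  let s := pvArr array 0 - value.getD "i" 0 - value.getD "l" 0
  pvA_ae_loop array visited value s (PySem.List.pyRange 1 s 1)

def pvA_set_b_f (array : List Int) (visited : List Bool) (value : PySem.Dict String Int) : Int :=
  let s := pvArr array 1 - value.getD "j" 0 - value.getD "m" 0
  (PySem.List.pyRange 1 s 1).foldl (fun ret b =>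
    if b > 13 || (s - b) > 13 || pvGetV visited b || pvGetV visited (s - b) || b == (s - b) then ret
    else ret + pvA_set_a_e array (pvSetV (pvSetV visited b) (s - b))
               ((value.insert "b" b).insert "f" (s - b))) 0

def pvA_set_l_m (array : List Int) (visited : List Bool) (value : PySem.Dict String Int) : Int :=
  let H := pvArr array 7
  (PySem.List.pyRange 1 H 1).foldl (fun ret l =>
    if (H - l) > 13 || l > 13 || pvGetV visited (H - l) || pvGetV visited l || (H - l) == l then ret
    else ret + pvA_set_b_f array (pvSetV (pvSetV visited (H - l)) l)
               ((value.insert "m" (H - l)).insert "l" l)) 0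

def pvA_set_d_h (array : List Int) (visited : List Bool) (value : PySem.Dict String Int) : Int :=
  let D := pvArr array 3
  (PySem.List.pyRange 1 D 1).foldl (fun ret d =>
    if d > 13 || (D - d) > 13 || pvGetV visited d || pvGetV visited (D - d) || d == (D - d) then ret
    else ret + pvA_set_l_m array (pvSetV (pvSetV visited d) (D - d))
               ((value.insert "d" d).insert "h" (D - d))) 0

def pvA_set_i_j (array : List Int) (visited : List Bool) (value : PySem.Dict String Int) : Int :=
  let s := pvArr array 6 - value.getD "k" 0
  (PySem.List.pyRange 1 s 1).foldl (fun ret i =>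
    if i > 13 || (s - i) > 13 || pvGetV visited i || pvGetV visited (s - i) || i == (s - i) then ret
    else ret + pvA_set_d_h array (pvSetV (pvSetV visited i) (s - i))
               ((value.insert "i" i).insert "j" (s - i))) 0

def set_c_g (array : List Int) (visited : List Bool) (value : List (String × Int)) : Int :=
  let d0 := PySem.Dict.mk value
  let s := pvArr array 2 - d0.getD "k" 0
  (PySem.List.pyRange 1 s 1).foldl (fun ret c =>
    if c > 13 || (s - c) > 13 || pvGetV visited c || pvGetV visited (s - c) || c == (s - c) then ret
    else ret + pvA_set_i_j array (pvSetV (pvSetV visited c) (s - c))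
               ((d0.insert "c" c).insert "g" (s - c))) 0

-- ===== PORT B =====
-- `pairs(total, used)` of Source B: the list comprehension over range(1, total)
def pvB_pairs (visited : List Bool) (total : Int) (used : List Int) : List (Int × Int) :=
  (PySem.List.pyRange 1 total 1).filterMap (fun x =>
    if decide (x ≤ 13) && decide (total - x ≤ 13) && !(x == total - x)
       && !(pvGetV visited x) && !(used.contains x)
       && !(pvGetV visited (total - x)) && !(used.contains (total - x))
    then some (x, total - x) else none)

def set_c_g_alt (array : List Int) (visited : List Bool) (value : List (String × Int)) : Int :=
  let k := (PySem.Dict.mk value).getD "k" 0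
  (pvB_pairs visited (pvArr array 2 - k) []).foldl (fun count cg =>
    (pvB_pairs visited (pvArr array 6 - k) [cg.1, cg.2]).foldl (fun count ij =>
      (pvB_pairs visited (pvArr array 3) [cg.1, cg.2, ij.1, ij.2]).foldl (fun count dh =>
        (pvB_pairs visited (pvArr array 7) [cg.1, cg.2, ij.1, ij.2, dh.1, dh.2]).foldl (fun count lm =>
          (pvB_pairs visited (pvArr array 1 - ij.2 - lm.2)
              [cg.1, cg.2, ij.1, ij.2, dh.1, dh.2, lm.1, lm.2]).foldl (fun count bf =>
            if decide (1 ≤ pvArr array 4 - bf.1 - cg.1 - dh.1)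
               && decide (pvArr array 4 - bf.1 - cg.1 - dh.1 < pvArr array 0 - ij.1 - lm.1)
               && decide (pvArr array 4 - bf.1 - cg.1 - dh.1 ≤ 13)
               && decide ((pvArr array 0 - ij.1 - lm.1) - (pvArr array 4 - bf.1 - cg.1 - dh.1) ≤ 13)
               && !((pvArr array 4 - bf.1 - cg.1 - dh.1) == (pvArr array 0 - ij.1 - lm.1) - (pvArr array 4 - bf.1 - cg.1 - dh.1))
               && !(pvGetV visited (pvArr array 4 - bf.1 - cg.1 - dh.1))
               && !([cg.1, cg.2, ij.1, ij.2, dh.1, dh.2, lm.1, lm.2, bf.1, bf.2].contains (pvArr array 4 - bf.1 - cg.1 - dh.1))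
               && !(pvGetV visited ((pvArr array 0 - ij.1 - lm.1) - (pvArr array 4 - bf.1 - cg.1 - dh.1)))
               && !([cg.1, cg.2, ij.1, ij.2, dh.1, dh.2, lm.1, lm.2, bf.1, bf.2].contains ((pvArr array 0 - ij.1 - lm.1) - (pvArr array 4 - bf.1 - cg.1 - dh.1)))
               && (((pvArr array 0 - ij.1 - lm.1) - (pvArr array 4 - bf.1 - cg.1 - dh.1)) + bf.2 + cg.2 + dh.2 == pvArr array 5)
            then count + 1 else count) count) count) count) count) 0

-- ===== PRECONDITION & SPEC =====
-- Pre_ admits the shape on which every index / key access A can make is defined (array[0..7],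
-- visited indices 1..13, key 'k'), and also the inputs whose top-level range does the guarded
-- work for no c at all (array[2]-k outside 2..27: A returns 0 after reading only array[2] and
-- value['k']).  It still excludes some inputs where A returns 0 only because `visited` happens
-- to cut every branch before an out-of-range read (there both programs also agree).
def Pre_set_c_g (array : List Int) (visited : List Bool) (value : List (String × Int)) : Prop :=
  "k" ∈ value.map Prod.fst ∧ 3 ≤ array.length ∧
    (8 ≤ array.length ∧ 14 ≤ visited.length ∨
      array.getD 2 0 - (PySem.Dict.mk value).getD "k" 0 ≤ 1 ∨
      27 < array.getD 2 0 - (PySem.Dict.mk value).getD "k" 0)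
instance (array : List Int) (visited : List Bool) (value : List (String × Int)) : Decidable (Pre_set_c_g array visited value) := by unfold Pre_set_c_g; infer_instance

def pvWitness_set_c_g : List Int × List Bool × (List (String × Int)) :=
  ([22, 23, 20, 19, 24, 26, 21, 18], List.replicate 14 false, [("k", 2)])

def Spec_set_c_g (array : List Int) (visited : List Bool) (value : List (String × Int)) (out : Int) : Prop := out = set_c_g_alt array visited value
instance (array : List Int) (visited : List Bool) (value : List (String × Int)) (out : Int) : Decidable (Spec_set_c_g array visited value out) := by unfold Spec_set_c_g; infer_instance

-- ===== CLAIM (what is proved, stated in full; the proofs are below) =====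
def Claim_equal_set_c_g : Prop := ∀ (array : List Int) (visited : List Bool) (value : List (String × Int)), Dom_set_c_g array visited value → Pre_set_c_g array visited value → Spec_set_c_g array visited value (set_c_g array visited value)

-- ===== LEMMAS AND PROOFS =====

-- marking a list of positions True in `visited` (what A's nested visited[x] = True amount to)
def pvMark (v : List Bool) (us : List Int) : List Bool := us.foldl pvSetV v

theorem pvGetV_pvMark (v : List Bool) (us : List Int)
    (hlen : 14 ≤ v.length) (hus : ∀ u ∈ us, 1 ≤ u ∧ u ≤ 13)
    (z : Int) (hz1 : 1 ≤ z) (hz2 : z ≤ 13) :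
    pvGetV (pvMark v us) z = (pvGetV v z || us.contains z) := by
  induction us generalizing v with
  | nil => simp [pvMark]
  | cons u us ih =>
      obtain ⟨hu1, hu2⟩ := hus u (List.mem_cons_self ..)
      have hlen' : 14 ≤ (pvSetV v u).length := by
        simpa [pvSetV, PySem.List.length_pySetD] using hlen
      rw [show pvMark v (u :: us) = pvMark (pvSetV v u) us from rfl,
          ih (pvSetV v u) hlen' (fun x hx => hus x (List.mem_cons_of_mem _ hx))]
      have hset : pvSetV v u = v.set u.toNat true :=
        PySem.List.pySetD_of_nonneg v true (by omega)
      have hzl : z.toNat < v.length := by omega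
      have h1 : pvGetV (pvSetV v u) z = (v.set u.toNat true)[z.toNat]'(by simpa using hzl) := by
        rw [hset, pvGetV, PySem.List.pyGetD_eq_getElem _ _ (by omega) (by simp; omega)]
      have h2 : pvGetV v z = v[z.toNat]'hzl := by
        rw [pvGetV, PySem.List.pyGetD_eq_getElem _ _ (by omega) (by omega)]
      rw [h1, h2, List.getElem_set]
      by_cases hzu : z = u
      · subst hzu
        simp
      · have : u.toNat ≠ z.toNat := by omega
        simp [this, hzu, ← h2]

-- shift invariance of A's loop accumulator
theorem pvFoldl_if_shift (skip : Int → Bool) (fA : Int → Int) :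
    ∀ (L : List Int) (a : Int),
      L.foldl (fun r x => if skip x then r else r + fA x) a
        = a + L.foldl (fun r x => if skip x then r else r + fA x) 0 := by
  intro L
  induction L with
  | nil => simp
  | cons x L ih =>
      intro a
      by_cases h : skip x = true
      · simpa only [List.foldl_cons, if_pos h] using ih a
      · simp only [List.foldl_cons, if_neg h]
        rw [ih (a + fA x), zero_add, ih (fA x)]
        omega

-- the generic level equivalence: B's fold over the kept pairs starting at `init`
-- equals `init +` A's guarded fold over the whole range
theorem pvLevel (total : Int) (skip keep : Int → Bool) (fA : Int → Int)
    (bodyB : Int → Int × Int → Int)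
    (h1 : ∀ x, 1 ≤ x → x < total → skip x = !keep x)
    (h2 : ∀ r x, 1 ≤ x → x < total → keep x = true → bodyB r (x, total - x) = r + fA x) :
    ∀ (L : List Int), (∀ x ∈ L, 1 ≤ x ∧ x < total) → ∀ init,
      (L.filterMap (fun x => if keep x then some (x, total - x) else none)).foldl bodyB init
      = init + L.foldl (fun r x => if skip x then r else r + fA x) 0 := by
  intro L
  induction L with
  | nil => intro _ init; simp
  | cons x L ih =>
      intro hmem init
      obtain ⟨hx1, hx2⟩ := hmem x (List.mem_cons_self ..)
      have hmem' := fun y hy => hmem y (List.mem_cons_of_mem x hy)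
      by_cases hk : keep x = true
      · have hs : skip x = false := by rw [h1 x hx1 hx2, hk]; rfl
        simp only [List.filterMap_cons, hk, if_pos, List.foldl_cons, hs, Bool.false_eq_true,
          if_false, zero_add]
        rw [ih hmem' (bodyB init (x, total - x)), h2 init x hx1 hx2 hk,
          pvFoldl_if_shift skip fA L (fA x)]
        omega
      · have hs : skip x = true := by rw [h1 x hx1 hx2, Bool.eq_false_iff.mpr hk]; rfl
        simp only [List.filterMap_cons, hk, if_false, List.foldl_cons, hs, if_true]
        exact ih hmem' init

-- A's guard (on the marked visited) is the negation of B's keep-condition (on the original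
-- visited plus the used list)
theorem pvGuard (v : List Bool) (usA usB : List Int) (total x : Int)
    (hlen : 14 ≤ v.length) (husA : ∀ u ∈ usA, 1 ≤ u ∧ u ≤ 13)
    (hc : ∀ z, usA.contains z = usB.contains z)
    (hx1 : 1 ≤ x) (hx2 : x < total) :
    (x > 13 || (total - x) > 13 || pvGetV (pvMark v usA) x || pvGetV (pvMark v usA) (total - x)
      || x == (total - x))
    = !(decide (x ≤ 13) && decide (total - x ≤ 13) && !(x == total - x)
        && !(pvGetV v x) && !(usB.contains x)
        && !(pvGetV v (total - x)) && !(usB.contains (total - x))) := by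
  by_cases hx13 : x ≤ 13
  · by_cases hy13 : total - x ≤ 13
    · rw [pvGetV_pvMark v usA hlen husA x hx1 hx13,
        pvGetV_pvMark v usA hlen husA (total - x) (by omega) hy13, hc x, hc (total - x)]
      simp only [decide_eq_true_eq, hx13, hy13, decide_true, Bool.true_and,
        show ¬ (x > 13) by omega, show ¬ (total - x > 13) by omega, decide_false, Bool.false_or]
      cases pvGetV v x <;> cases usB.contains x <;> cases pvGetV v (total - x) <;>
        cases usB.contains (total - x) <;> cases hxe : x == total - x <;> simp
    · simp [show total - x > 13 by omega, show ¬ (total - x ≤ 13) by omega]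
  · simp [show x > 13 by omega, show ¬ (x ≤ 13) by omega]

-- characterisation of the early-return loop of set_a_e: it returns 1 iff some a passes
theorem pvAELoop (array : List Int) (w : List Bool) (value : PySem.Dict String Int) (s : Int) :
    ∀ L, pvA_ae_loop array w value s L =
      if L.any (fun a =>
          !(a > 13 || (s - a) > 13 || pvGetV w a || pvGetV w (s - a) || a == (s - a))
          && ((a + value.getD "b" 0 + value.getD "c" 0 + value.getD "d" 0 == pvArr array 4)
              && (pvArr array 5 == (s - a) + value.getD "f" 0 + value.getD "g" 0
                  + value.getD "h" 0)))
        then 1 else 0 := by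
  intro L
  induction L with
  | nil => simp [pvA_ae_loop]
  | cons a L ih =>
      rw [pvA_ae_loop, List.any_cons]
      by_cases hg : (a > 13 || (s - a) > 13 || pvGetV w a || pvGetV w (s - a) || a == (s - a))
          = true
      · rw [if_pos hg, ih]
        simp only [hg, Bool.not_true, Bool.false_and, Bool.false_or]
      · have hg' := Bool.eq_false_iff.mpr hg
        rw [if_neg hg]
        by_cases he : ((a + value.getD "b" 0 + value.getD "c" 0 + value.getD "d" 0
              == pvArr array 4)
            && (pvArr array 5 == (s - a) + value.getD "f" 0 + value.getD "g" 0
                + value.getD "h" 0)) = true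
        · rw [if_pos he]
          simp only [hg', Bool.not_false, Bool.true_and, he, Bool.true_or, if_true]
        · rw [if_neg he, ih]
          simp only [hg', Bool.not_false, Bool.true_and, Bool.eq_false_iff.mpr he,
            Bool.false_or]

theorem pvContains10 (c g i j d h mm l b f z : Int) :
    ([c,g,i,j,d,h,mm,l,b,f] : List Int).contains z
      = ([c,g,i,j,d,h,l,mm,b,f] : List Int).contains z := by
  simp only [List.contains_cons, List.contains_nil]
  cases z == mm <;> cases z == l <;> simp

theorem pvContains8 (c g i j d h mm l z : Int) :
    ([c,g,i,j,d,h,mm,l] : List Int).contains z = ([c,g,i,j,d,h,l,mm] : List Int).contains z := by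
  simp only [List.contains_cons, List.contains_nil]
  cases z == mm <;> cases z == l <;> simp

-- the innermost level: A's set_a_e loop against B's closed-form test
theorem pvAE (array : List Int) (v : List Bool) (d0 : PySem.Dict String Int)
    (c g i j d h mm l b f : Int) (hlen : 14 ≤ v.length)
    (hus : ∀ u ∈ ([c,g,i,j,d,h,mm,l,b,f] : List Int), 1 ≤ u ∧ u ≤ 13) :
    pvA_set_a_e array (pvMark v [c,g,i,j,d,h,mm,l,b,f])
      ((((((((((d0.insert "c" c).insert "g" g).insert "i" i).insert "j" j).insert "d" d).insert
        "h" h).insert "m" mm).insert "l" l).insert "b" b).insert "f" f)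
    = if decide (1 ≤ pvArr array 4 - b - c - d)
         && decide (pvArr array 4 - b - c - d < pvArr array 0 - i - l)
         && decide (pvArr array 4 - b - c - d ≤ 13)
         && decide ((pvArr array 0 - i - l) - (pvArr array 4 - b - c - d) ≤ 13)
         && !((pvArr array 4 - b - c - d) == (pvArr array 0 - i - l) - (pvArr array 4 - b - c - d))
         && !(pvGetV v (pvArr array 4 - b - c - d))
         && !(([c,g,i,j,d,h,l,mm,b,f] : List Int).contains (pvArr array 4 - b - c - d))
         && !(pvGetV v ((pvArr array 0 - i - l) - (pvArr array 4 - b - c - d)))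
         && !(([c,g,i,j,d,h,l,mm,b,f] : List Int).contains
              ((pvArr array 0 - i - l) - (pvArr array 4 - b - c - d)))
         && (((pvArr array 0 - i - l) - (pvArr array 4 - b - c - d)) + f + g + h == pvArr array 5)
      then 1 else 0 := by
  simp only [pvA_set_a_e, PySem.Dict.getD_insert, String.reduceEq, if_false, if_true, if_neg,
    if_pos, reduceIte]
  rw [pvAELoop]
  simp only [PySem.Dict.getD_insert, String.reduceEq, reduceIte]
  refine if_congr ?_ rfl rfl
  rw [List.any_eq_true]
  constructor
  · rintro ⟨a, haL, hq⟩
    obtain ⟨ha1, ha2⟩ := PySem.List.mem_pyRange_one.mp haL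
    simp only [Bool.and_eq_true, Bool.not_eq_true', Bool.or_eq_false_iff, decide_eq_false_iff_not,
      beq_iff_eq, beq_eq_false_iff_ne, ne_eq] at hq
    obtain ⟨⟨⟨⟨⟨h13a, h13e⟩, hva⟩, hve⟩, hne⟩, heq1, heq2⟩ := hq
    have ha : a = pvArr array 4 - b - c - d := by omega
    subst ha
    rw [pvGetV_pvMark v _ hlen hus _ ha1 (by omega)] at hva
    rw [pvGetV_pvMark v _ hlen hus _ (by omega) (by omega)] at hve
    rw [Bool.or_eq_false_iff] at hva hve
    obtain ⟨hva1, hva2⟩ := hva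
    obtain ⟨hve1, hve2⟩ := hve
    rw [pvContains10] at hva2 hve2
    simp only [Bool.and_eq_true, decide_eq_true_eq, Bool.not_eq_true', beq_iff_eq,
      beq_eq_false_iff_ne, ne_eq]
    exact ⟨⟨⟨⟨⟨⟨⟨⟨⟨by omega, by omega⟩, by omega⟩, by omega⟩, by omega⟩, hva1⟩, hva2⟩, hve1⟩,
      hve2⟩, by omega⟩
  · intro hC
    simp only [Bool.and_eq_true, decide_eq_true_eq, Bool.not_eq_true', beq_iff_eq,
      beq_eq_false_iff_ne, ne_eq] at hC
    obtain ⟨⟨⟨⟨⟨⟨⟨⟨⟨hb1, hb2⟩, hb3⟩, hb4⟩, hb5⟩, hb6⟩, hb7⟩, hb8⟩, hb9⟩, hb10⟩ := hC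
    refine ⟨pvArr array 4 - b - c - d, PySem.List.mem_pyRange_one.mpr ⟨hb1, hb2⟩, ?_⟩
    simp only [Bool.and_eq_true, Bool.not_eq_true', Bool.or_eq_false_iff, decide_eq_false_iff_not,
      beq_iff_eq, beq_eq_false_iff_ne, ne_eq]
    rw [pvGetV_pvMark v _ hlen hus _ hb1 (by omega),
      pvGetV_pvMark v _ hlen hus _ (by omega) (by omega), Bool.or_eq_false_iff,
      Bool.or_eq_false_iff]
    have hb7' : ([c,g,i,j,d,h,mm,l,b,f] : List Int).contains (pvArr array 4 - b - c - d)
        = false := by rw [pvContains10]; exact hb7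
    have hb9' : ([c,g,i,j,d,h,mm,l,b,f] : List Int).contains
        ((pvArr array 0 - i - l) - (pvArr array 4 - b - c - d)) = false := by
      rw [pvContains10]; exact hb9
    exact ⟨⟨⟨⟨⟨by omega, by omega⟩, hb6, hb7'⟩, hb8, hb9'⟩, by omega⟩, by omega, by omega⟩


theorem pvOrSwap (p q r s : Bool) (x y : Int) :
    (q || p || s || r || (y == x)) = (p || q || r || s || (x == y)) := by
  rw [show (y == x) = (x == y) from Bool.beq_comm]
  cases p <;> cases q <;> cases r <;> cases s <;> simp

theorem pvBF (array : List Int) (v : List Bool) (d0 : PySem.Dict String Int)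
    (c g i j d h mm l : Int) (hlen : 14 ≤ v.length)
    (hc : 1 ≤ c ∧ c ≤ 13) (hg : 1 ≤ g ∧ g ≤ 13) (hi : 1 ≤ i ∧ i ≤ 13) (hj : 1 ≤ j ∧ j ≤ 13)
    (hd : 1 ≤ d ∧ d ≤ 13) (hh : 1 ≤ h ∧ h ≤ 13) (hm : 1 ≤ mm ∧ mm ≤ 13) (hl : 1 ≤ l ∧ l ≤ 13) :
    ∀ init, (pvB_pairs v (pvArr array 1 - j - mm) ([c,g,i,j,d,h,l,mm] : List Int)).foldl
      (fun count bf =>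
        if decide (1 ≤ pvArr array 4 - bf.1 - c - d)
            && decide (pvArr array 4 - bf.1 - c - d < pvArr array 0 - i - l)
            && decide (pvArr array 4 - bf.1 - c - d ≤ 13)
            && decide ((pvArr array 0 - i - l) - (pvArr array 4 - bf.1 - c - d) ≤ 13)
            && !((pvArr array 4 - bf.1 - c - d) == (pvArr array 0 - i - l) - (pvArr array 4 - bf.1 - c - d))
            && !(pvGetV v (pvArr array 4 - bf.1 - c - d))
            && !(([c,g,i,j,d,h,l,mm,bf.1,bf.2] : List Int).contains (pvArr array 4 - bf.1 - c - d))
            && !(pvGetV v ((pvArr array 0 - i - l) - (pvArr array 4 - bf.1 - c - d)))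
            && !(([c,g,i,j,d,h,l,mm,bf.1,bf.2] : List Int).contains ((pvArr array 0 - i - l) - (pvArr array 4 - bf.1 - c - d)))
            && (((pvArr array 0 - i - l) - (pvArr array 4 - bf.1 - c - d)) + bf.2 + g + h == pvArr array 5)
        then count + 1 else count) init
    = init + pvA_set_b_f array (pvMark v [c,g,i,j,d,h,mm,l]) ((((((((d0.insert "c" c).insert "g" g).insert "i" i).insert "j" j).insert "d" d).insert "h" h).insert "m" mm).insert "l" l) := by
  intro init
  have husA : ∀ u ∈ ([c,g,i,j,d,h,mm,l] : List Int), 1 ≤ u ∧ u ≤ 13 := by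
    intro u hu
    simp only [List.mem_cons, List.not_mem_nil, or_false] at hu
    rcases hu with rfl|rfl|rfl|rfl|rfl|rfl|rfl|rfl <;> omega
  simp only [pvA_set_b_f, PySem.Dict.getD_insert, String.reduceEq, reduceIte, pvB_pairs]
  refine pvLevel _ _ _ _ _ ?_ ?_ _ (fun x hx => PySem.List.mem_pyRange_one.mp hx) init
  · intro x hx1 hx2
    exact pvGuard v [c,g,i,j,d,h,mm,l] [c,g,i,j,d,h,l,mm] _ x hlen husA
      (pvContains8 c g i j d h mm l) hx1 hx2
  · intro r x hx1 hx2 hk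
    simp only [Bool.and_eq_true, decide_eq_true_eq, Bool.not_eq_true'] at hk
    obtain ⟨⟨⟨⟨⟨⟨hx13, hy13⟩, -⟩, -⟩, -⟩, -⟩, -⟩ := hk
    have hus10 : ∀ u ∈ ([c,g,i,j,d,h,mm,l,x,pvArr array 1 - j - mm - x] : List Int),
        1 ≤ u ∧ u ≤ 13 := by
      intro u hu
      simp only [List.mem_cons, List.not_mem_nil, or_false] at hu
      rcases hu with rfl|rfl|rfl|rfl|rfl|rfl|rfl|rfl|rfl|rfl <;> omega
    have hae := pvAE array v d0 c g i j d h mm l x (pvArr array 1 - j - mm - x) hlen hus10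
    have key : (if decide (1 ≤ pvArr array 4 - x - c - d)
            && decide (pvArr array 4 - x - c - d < pvArr array 0 - i - l)
            && decide (pvArr array 4 - x - c - d ≤ 13)
            && decide ((pvArr array 0 - i - l) - (pvArr array 4 - x - c - d) ≤ 13)
            && !((pvArr array 4 - x - c - d) == (pvArr array 0 - i - l) - (pvArr array 4 - x - c - d))
            && !(pvGetV v (pvArr array 4 - x - c - d))
            && !(([c,g,i,j,d,h,l,mm,x,(pvArr array 1 - j - mm - x)] : List Int).contains (pvArr array 4 - x - c - d))
            && !(pvGetV v ((pvArr array 0 - i - l) - (pvArr array 4 - x - c - d)))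
            && !(([c,g,i,j,d,h,l,mm,x,(pvArr array 1 - j - mm - x)] : List Int).contains ((pvArr array 0 - i - l) - (pvArr array 4 - x - c - d)))
            && (((pvArr array 0 - i - l) - (pvArr array 4 - x - c - d)) + (pvArr array 1 - j - mm - x) + g + h == pvArr array 5)
        then r + 1 else r)
        = r + pvA_set_a_e array (pvMark v [c,g,i,j,d,h,mm,l,x,pvArr array 1 - j - mm - x])
            ((((((((((d0.insert "c" c).insert "g" g).insert "i" i).insert "j" j).insert "d" d).insert "h" h).insert "m" mm).insert "l" l).insert "b" x).insert "f" (pvArr array 1 - j - mm - x)) := by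
      rw [hae]
      split_ifs <;> omega
    exact key

theorem pvLM (array : List Int) (v : List Bool) (d0 : PySem.Dict String Int)
    (c g i j d h : Int) (hlen : 14 ≤ v.length)
    (hc : 1 ≤ c ∧ c ≤ 13) (hg : 1 ≤ g ∧ g ≤ 13) (hi : 1 ≤ i ∧ i ≤ 13) (hj : 1 ≤ j ∧ j ≤ 13)
    (hd : 1 ≤ d ∧ d ≤ 13) (hh : 1 ≤ h ∧ h ≤ 13) :
    ∀ init, (pvB_pairs v (pvArr array 7) ([c,g,i,j,d,h] : List Int)).foldl
      (fun count lm =>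
        (pvB_pairs v (pvArr array 1 - j - lm.2) ([c,g,i,j,d,h,lm.1,lm.2] : List Int)).foldl
          (fun count bf =>
            if decide (1 ≤ pvArr array 4 - bf.1 - c - d)
                && decide (pvArr array 4 - bf.1 - c - d < pvArr array 0 - i - lm.1)
                && decide (pvArr array 4 - bf.1 - c - d ≤ 13)
                && decide ((pvArr array 0 - i - lm.1) - (pvArr array 4 - bf.1 - c - d) ≤ 13)
                && !((pvArr array 4 - bf.1 - c - d) == (pvArr array 0 - i - lm.1) - (pvArr array 4 - bf.1 - c - d))
                && !(pvGetV v (pvArr array 4 - bf.1 - c - d))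
                && !(([c,g,i,j,d,h,lm.1,lm.2,bf.1,bf.2] : List Int).contains (pvArr array 4 - bf.1 - c - d))
                && !(pvGetV v ((pvArr array 0 - i - lm.1) - (pvArr array 4 - bf.1 - c - d)))
                && !(([c,g,i,j,d,h,lm.1,lm.2,bf.1,bf.2] : List Int).contains ((pvArr array 0 - i - lm.1) - (pvArr array 4 - bf.1 - c - d)))
                && (((pvArr array 0 - i - lm.1) - (pvArr array 4 - bf.1 - c - d)) + bf.2 + g + h == pvArr array 5)
            then count + 1 else count) count) init
    = init + pvA_set_l_m array (pvMark v [c,g,i,j,d,h]) ((((((d0.insert "c" c).insert "g" g).insert "i" i).insert "j" j).insert "d" d).insert "h" h) := by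
  intro init
  have husA : ∀ u ∈ ([c,g,i,j,d,h] : List Int), 1 ≤ u ∧ u ≤ 13 := by
    intro u hu
    simp only [List.mem_cons, List.not_mem_nil, or_false] at hu
    rcases hu with rfl|rfl|rfl|rfl|rfl|rfl <;> omega
  simp only [pvA_set_l_m, PySem.Dict.getD_insert, String.reduceEq, reduceIte, pvB_pairs]
  refine pvLevel _ _ _ _ _ ?_ ?_ _ (fun x hx => PySem.List.mem_pyRange_one.mp hx) init
  · intro x hx1 hx2
    rw [pvOrSwap]
    exact pvGuard v [c,g,i,j,d,h] [c,g,i,j,d,h] _ x hlen husA (fun z => rfl) hx1 hx2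
  · intro r x hx1 hx2 hk
    simp only [Bool.and_eq_true, decide_eq_true_eq, Bool.not_eq_true'] at hk
    obtain ⟨⟨⟨⟨⟨⟨hx13, hy13⟩, -⟩, -⟩, -⟩, -⟩, -⟩ := hk
    exact pvBF array v d0 c g i j d h (pvArr array 7 - x) x hlen hc hg hi hj hd hh
      ⟨by omega, by omega⟩ ⟨by omega, by omega⟩ r

theorem pvDH (array : List Int) (v : List Bool) (d0 : PySem.Dict String Int)
    (c g i j : Int) (hlen : 14 ≤ v.length)
    (hc : 1 ≤ c ∧ c ≤ 13) (hg : 1 ≤ g ∧ g ≤ 13) (hi : 1 ≤ i ∧ i ≤ 13) (hj : 1 ≤ j ∧ j ≤ 13) :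
    ∀ init, (pvB_pairs v (pvArr array 3) ([c,g,i,j] : List Int)).foldl
      (fun count dh =>
        (pvB_pairs v (pvArr array 7) ([c,g,i,j,dh.1,dh.2] : List Int)).foldl
          (fun count lm =>
            (pvB_pairs v (pvArr array 1 - j - lm.2) ([c,g,i,j,dh.1,dh.2,lm.1,lm.2] : List Int)).foldl
              (fun count bf =>
                if decide (1 ≤ pvArr array 4 - bf.1 - c - dh.1)
                    && decide (pvArr array 4 - bf.1 - c - dh.1 < pvArr array 0 - i - lm.1)
                    && decide (pvArr array 4 - bf.1 - c - dh.1 ≤ 13)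
                    && decide ((pvArr array 0 - i - lm.1) - (pvArr array 4 - bf.1 - c - dh.1) ≤ 13)
                    && !((pvArr array 4 - bf.1 - c - dh.1) == (pvArr array 0 - i - lm.1) - (pvArr array 4 - bf.1 - c - dh.1))
                    && !(pvGetV v (pvArr array 4 - bf.1 - c - dh.1))
                    && !(([c,g,i,j,dh.1,dh.2,lm.1,lm.2,bf.1,bf.2] : List Int).contains (pvArr array 4 - bf.1 - c - dh.1))
                    && !(pvGetV v ((pvArr array 0 - i - lm.1) - (pvArr array 4 - bf.1 - c - dh.1)))
                    && !(([c,g,i,j,dh.1,dh.2,lm.1,lm.2,bf.1,bf.2] : List Int).contains ((pvArr array 0 - i - lm.1) - (pvArr array 4 - bf.1 - c - dh.1)))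
                    && (((pvArr array 0 - i - lm.1) - (pvArr array 4 - bf.1 - c - dh.1)) + bf.2 + g + dh.2 == pvArr array 5)
                then count + 1 else count) count) count) init
    = init + pvA_set_d_h array (pvMark v [c,g,i,j]) ((((d0.insert "c" c).insert "g" g).insert "i" i).insert "j" j) := by
  intro init
  have husA : ∀ u ∈ ([c,g,i,j] : List Int), 1 ≤ u ∧ u ≤ 13 := by
    intro u hu
    simp only [List.mem_cons, List.not_mem_nil, or_false] at hu
    rcases hu with rfl|rfl|rfl|rfl <;> omega
  simp only [pvA_set_d_h, PySem.Dict.getD_insert, String.reduceEq, reduceIte, pvB_pairs]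
  refine pvLevel _ _ _ _ _ ?_ ?_ _ (fun x hx => PySem.List.mem_pyRange_one.mp hx) init
  · intro x hx1 hx2
    exact pvGuard v [c,g,i,j] [c,g,i,j] _ x hlen husA (fun z => rfl) hx1 hx2
  · intro r x hx1 hx2 hk
    simp only [Bool.and_eq_true, decide_eq_true_eq, Bool.not_eq_true'] at hk
    obtain ⟨⟨⟨⟨⟨⟨hx13, hy13⟩, -⟩, -⟩, -⟩, -⟩, -⟩ := hk
    exact pvLM array v d0 c g i j x (pvArr array 3 - x) hlen hc hg hi hj
      ⟨by omega, by omega⟩ ⟨by omega, by omega⟩ r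

theorem pvIJ (array : List Int) (v : List Bool) (d0 : PySem.Dict String Int)
    (c g : Int) (hlen : 14 ≤ v.length)
    (hc : 1 ≤ c ∧ c ≤ 13) (hg : 1 ≤ g ∧ g ≤ 13) :
    ∀ init, (pvB_pairs v (pvArr array 6 - d0.getD "k" 0) ([c,g] : List Int)).foldl
      (fun count ij =>
        (pvB_pairs v (pvArr array 3) ([c,g,ij.1,ij.2] : List Int)).foldl
          (fun count dh =>
            (pvB_pairs v (pvArr array 7) ([c,g,ij.1,ij.2,dh.1,dh.2] : List Int)).foldl
              (fun count lm =>
                (pvB_pairs v (pvArr array 1 - ij.2 - lm.2) ([c,g,ij.1,ij.2,dh.1,dh.2,lm.1,lm.2] : List Int)).foldl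
                  (fun count bf =>
                    if decide (1 ≤ pvArr array 4 - bf.1 - c - dh.1)
                        && decide (pvArr array 4 - bf.1 - c - dh.1 < pvArr array 0 - ij.1 - lm.1)
                        && decide (pvArr array 4 - bf.1 - c - dh.1 ≤ 13)
                        && decide ((pvArr array 0 - ij.1 - lm.1) - (pvArr array 4 - bf.1 - c - dh.1) ≤ 13)
                        && !((pvArr array 4 - bf.1 - c - dh.1) == (pvArr array 0 - ij.1 - lm.1) - (pvArr array 4 - bf.1 - c - dh.1))
                        && !(pvGetV v (pvArr array 4 - bf.1 - c - dh.1))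
                        && !(([c,g,ij.1,ij.2,dh.1,dh.2,lm.1,lm.2,bf.1,bf.2] : List Int).contains (pvArr array 4 - bf.1 - c - dh.1))
                        && !(pvGetV v ((pvArr array 0 - ij.1 - lm.1) - (pvArr array 4 - bf.1 - c - dh.1)))
                        && !(([c,g,ij.1,ij.2,dh.1,dh.2,lm.1,lm.2,bf.1,bf.2] : List Int).contains ((pvArr array 0 - ij.1 - lm.1) - (pvArr array 4 - bf.1 - c - dh.1)))
                        && (((pvArr array 0 - ij.1 - lm.1) - (pvArr array 4 - bf.1 - c - dh.1)) + bf.2 + g + dh.2 == pvArr array 5)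
                    then count + 1 else count) count) count) count) init
    = init + pvA_set_i_j array (pvMark v [c,g]) ((d0.insert "c" c).insert "g" g) := by
  intro init
  have husA : ∀ u ∈ ([c,g] : List Int), 1 ≤ u ∧ u ≤ 13 := by
    intro u hu
    simp only [List.mem_cons, List.not_mem_nil, or_false] at hu
    rcases hu with rfl|rfl <;> omega
  simp only [pvA_set_i_j, PySem.Dict.getD_insert, String.reduceEq, reduceIte, pvB_pairs]
  refine pvLevel _ _ _ _ _ ?_ ?_ _ (fun x hx => PySem.List.mem_pyRange_one.mp hx) init
  · intro x hx1 hx2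
    exact pvGuard v [c,g] [c,g] _ x hlen husA (fun z => rfl) hx1 hx2
  · intro r x hx1 hx2 hk
    simp only [Bool.and_eq_true, decide_eq_true_eq, Bool.not_eq_true'] at hk
    obtain ⟨⟨⟨⟨⟨⟨hx13, hy13⟩, -⟩, -⟩, -⟩, -⟩, -⟩ := hk
    exact pvDH array v d0 c g x (pvArr array 6 - d0.getD "k" 0 - x) hlen hc hg
      ⟨by omega, by omega⟩ ⟨by omega, by omega⟩ r

-- ===== VERDICT (by name: the statement is the Claim_ definition above) =====
theorem set_c_g_spec : Claim_equal_set_c_g := by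
  intro array visited value hDom hPre
  obtain ⟨hkey, harr3, hrest⟩ := hPre
  have he : pvArr array 2 = array.getD 2 0 := by simp [pvArr, pysem]
  unfold Spec_set_c_g
  rcases hrest with ⟨harr, hlen⟩ | hdeg
  · have htop : set_c_g_alt array visited value = 0 + set_c_g array visited value := by
      simp only [set_c_g, set_c_g_alt, PySem.Dict.getD_insert, String.reduceEq, reduceIte,
        pvB_pairs]
      refine pvLevel _ _ _ _ _ ?_ ?_ _ (fun x hx => PySem.List.mem_pyRange_one.mp hx) 0
      · intro x hx1 hx2
        exact pvGuard visited [] [] _ x hlen (by intro u hu; simp at hu) (fun z => rfl) hx1 hx2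
      · intro r x hx1 hx2 hk
        simp only [Bool.and_eq_true, decide_eq_true_eq, Bool.not_eq_true'] at hk
        obtain ⟨⟨⟨⟨⟨⟨hx13, hy13⟩, -⟩, -⟩, -⟩, -⟩, -⟩ := hk
        exact pvIJ array visited (PySem.Dict.mk value) x
          (pvArr array 2 - (PySem.Dict.mk value).getD "k" 0 - x) hlen
          ⟨by omega, by omega⟩ ⟨by omega, by omega⟩ r
    omega
  · -- the top-level range keeps no c at all: both sides are a fold that only skips
    have htop : set_c_g_alt array visited value = 0 + set_c_g array visited value := by
      simp only [set_c_g, set_c_g_alt, PySem.Dict.getD_insert, String.reduceEq, reduceIte,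
        pvB_pairs]
      refine pvLevel _ _ _ _ _ ?_ ?_ _ (fun x hx => PySem.List.mem_pyRange_one.mp hx) 0
      · intro x hx1 hx2
        have h27 : x > 13 ∨ pvArr array 2 - (PySem.Dict.mk value).getD "k" 0 - x > 13 := by
          omega
        rcases h27 with h13 | h13
        · simp [show ¬ (x ≤ 13) by omega, h13]
        · simp [h13, show ¬ (pvArr array 2 - (PySem.Dict.mk value).getD "k" 0 - x ≤ 13) by omega]
      · intro r x hx1 hx2 hk
        exfalso
        simp only [Bool.and_eq_true, decide_eq_true_eq, Bool.not_eq_true'] at hk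
        obtain ⟨⟨⟨⟨⟨⟨hx13, hy13⟩, -⟩, -⟩, -⟩, -⟩, -⟩ := hk
        omega
    omega
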